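-- pv_equiv track=rewrite | github.com/suhli/gba-narutorpg-chs | python/debug/8x8_font.py | blit_center
-- ===== SOURCE A (Python) =====
-- def blit_center(src, sw, sh, dw=8, dh=8, xoff=0, yoff=0):
--     # 居中贴到 8x8，超出则裁切
--     dst = [[0]*dw for _ in range(dh)]
--     ox = (dw - sw)//2 + xoff
--     oy = (dh - sh)//2 + yoff
--     for y in range(sh):
--         ty = oy + y
--         if 0 <= ty < dh:
--             row = src[y]
--             for x in range(sw):
--                 tx = ox + x
--                 if 0 <= tx < dw:
--                     dst[ty][tx] = row[x]
--     return dst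
-- ===== SOURCE B (Python) =====
-- def blit_center(src, sw, sh, dw=8, dh=8, xoff=0, yoff=0):
--     # gather/pull blit: walk destination cells and inverse-map into the source
--     ox = (dw - sw)//2 + xoff
--     oy = (dh - sh)//2 + yoff
--     return [[src[ty - oy][tx - ox]
--              if 0 <= ty - oy < sh and 0 <= tx - ox < sw else 0
--              for tx in range(dw)]
--             for ty in range(dh)]
-- ===== Notes on version B (the rewrite author's own statement) =====
-- stated objective: alternative
-- what changed: Replaces the scatter blit (pre-zeroed grid mutated by nested source loops with in-place writes) by a gather blit that builds each destination row directly, inverse-mapping every destination cell to its source cell.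
import Mathlib
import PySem

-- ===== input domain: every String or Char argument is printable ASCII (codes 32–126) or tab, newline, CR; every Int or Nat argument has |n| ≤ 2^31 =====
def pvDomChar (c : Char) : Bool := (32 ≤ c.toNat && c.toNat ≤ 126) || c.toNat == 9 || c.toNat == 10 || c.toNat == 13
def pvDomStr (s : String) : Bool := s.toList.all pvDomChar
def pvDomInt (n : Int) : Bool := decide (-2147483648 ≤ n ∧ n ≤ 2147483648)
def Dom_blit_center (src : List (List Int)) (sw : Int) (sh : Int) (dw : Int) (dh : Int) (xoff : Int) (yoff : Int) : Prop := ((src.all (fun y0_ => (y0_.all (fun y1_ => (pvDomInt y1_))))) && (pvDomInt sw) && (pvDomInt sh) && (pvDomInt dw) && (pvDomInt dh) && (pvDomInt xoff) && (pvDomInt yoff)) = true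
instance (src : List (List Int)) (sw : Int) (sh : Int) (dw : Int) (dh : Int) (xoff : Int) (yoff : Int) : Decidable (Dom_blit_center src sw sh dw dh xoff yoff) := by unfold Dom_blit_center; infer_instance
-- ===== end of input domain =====

-- B replaces A's scatter blit (zeroed grid mutated by source loops) by a gather blit over destination cells; objective: alternative decomposition, same cost class.
-- ===== PORT A =====
def blit_center (src : List (List Int)) (sw : Int) (sh : Int) (dw : Int) (dh : Int) (xoff : Int) (yoff : Int) : List (List Int) :=
  let dst := List.replicate dh.toNat (List.replicate dw.toNat (0:Int))
  let ox := PySem.Int.floordiv (dw - sw) 2 + xoff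
  let oy := PySem.Int.floordiv (dh - sh) 2 + yoff
  (List.range sh.toNat).foldl (fun dst (y : Nat) =>
    let ty := oy + (y:Int)
    if 0 ≤ ty ∧ ty < dh then
      let row := (PySem.List.pyGet? src (y:Int)).getD []
      (List.range sw.toNat).foldl (fun dst (x : Nat) =>
        let tx := ox + (x:Int)
        if 0 ≤ tx ∧ tx < dw then
          dst.set ty.toNat ((dst.getD ty.toNat []).set tx.toNat ((PySem.List.pyGet? row (x:Int)).getD 0))
        else dst) dst
    else dst) dst

-- ===== PORT B =====
def blit_center_alt (src : List (List Int)) (sw : Int) (sh : Int) (dw : Int) (dh : Int) (xoff : Int) (yoff : Int) : List (List Int) :=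
  let ox := PySem.Int.floordiv (dw - sw) 2 + xoff
  let oy := PySem.Int.floordiv (dh - sh) 2 + yoff
  (List.range dh.toNat).map (fun (ty : Nat) =>
    (List.range dw.toNat).map (fun (tx : Nat) =>
      if 0 ≤ (ty:Int) - oy ∧ (ty:Int) - oy < sh ∧ 0 ≤ (tx:Int) - ox ∧ (tx:Int) - ox < sw then
        (PySem.List.pyGet? ((PySem.List.pyGet? src ((ty:Int) - oy)).getD []) ((tx:Int) - ox)).getD 0
      else 0))

-- ===== PRECONDITION & SPEC =====
-- Pre_ excludes exactly the inputs on which Python A raises IndexError: a source row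
-- index hit by the clipped loops that is past the end of src, or a column index past
-- the end of that row.
def Pre_blit_center (src : List (List Int)) (sw : Int) (sh : Int) (dw : Int) (dh : Int) (xoff : Int) (yoff : Int) : Prop :=
  (min sh (dh - (PySem.Int.floordiv (dh - sh) 2 + yoff)) ≤ max 0 (-(PySem.Int.floordiv (dh - sh) 2 + yoff)) ∨
    min sh (dh - (PySem.Int.floordiv (dh - sh) 2 + yoff)) ≤ (src.length : Int)) ∧
  ∀ y ∈ List.range src.length,
    (max 0 (-(PySem.Int.floordiv (dh - sh) 2 + yoff)) ≤ (y:Int) ∧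
      (y:Int) < min sh (dh - (PySem.Int.floordiv (dh - sh) 2 + yoff))) →
    (min sw (dw - (PySem.Int.floordiv (dw - sw) 2 + xoff)) ≤ max 0 (-(PySem.Int.floordiv (dw - sw) 2 + xoff)) ∨
      min sw (dw - (PySem.Int.floordiv (dw - sw) 2 + xoff)) ≤ ((src.getD y []).length : Int))
instance (src : List (List Int)) (sw : Int) (sh : Int) (dw : Int) (dh : Int) (xoff : Int) (yoff : Int) : Decidable (Pre_blit_center src sw sh dw dh xoff yoff) := by unfold Pre_blit_center; infer_instance
def pvWitness_blit_center : List (List Int) × Int × Int × Int × Int × Int × Int := ([[1,2],[3,4]], 2, 2, 8, 8, 0, 0)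
def Spec_blit_center (src : List (List Int)) (sw : Int) (sh : Int) (dw : Int) (dh : Int) (xoff : Int) (yoff : Int) (out : List (List Int)) : Prop := out = blit_center_alt src sw sh dw dh xoff yoff
instance (src : List (List Int)) (sw : Int) (sh : Int) (dw : Int) (dh : Int) (xoff : Int) (yoff : Int) (out : List (List Int)) : Decidable (Spec_blit_center src sw sh dw dh xoff yoff out) := by unfold Spec_blit_center; infer_instance

-- ===== CLAIM (what is proved, stated in full; the proofs are below) =====
def Claim_equal_blit_center : Prop := ∀ (src : List (List Int)) (sw : Int) (sh : Int) (dw : Int) (dh : Int) (xoff : Int) (yoff : Int), Dom_blit_center src sw sh dw dh xoff yoff → Pre_blit_center src sw sh dw dh xoff yoff → Spec_blit_center src sw sh dw dh xoff yoff (blit_center src sw sh dw dh xoff yoff)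

-- ===== LEMMAS AND PROOFS =====

-- the value B pulls from the source at destination cell (i, j)
def bcVal (src : List (List Int)) (ox oy : Int) (i j : Nat) : Int :=
  (PySem.List.pyGet? ((PySem.List.pyGet? src ((i:Int) - oy)).getD []) ((j:Int) - ox)).getD 0

-- A's inner loop, acting on the touched row alone
def bcInner (ox dw : Int) (row : List Int) : List Int → Nat → List Int :=
  fun r x => if 0 ≤ ox + (x:Int) ∧ ox + (x:Int) < dw then
    r.set (ox + (x:Int)).toNat ((PySem.List.pyGet? row (x:Int)).getD 0) else r

-- A's outer loop step, exactly as it appears in the port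
def bcOuterStep (src : List (List Int)) (ox oy sw dw dh : Int) : List (List Int) → Nat → List (List Int) :=
  fun dst y =>
    let ty := oy + (y:Int)
    if 0 ≤ ty ∧ ty < dh then
      let row := (PySem.List.pyGet? src (y:Int)).getD []
      (List.range sw.toNat).foldl (fun dst (x : Nat) =>
        let tx := ox + (x:Int)
        if 0 ≤ tx ∧ tx < dw then
          dst.set ty.toNat ((dst.getD ty.toNat []).set tx.toNat ((PySem.List.pyGet? row (x:Int)).getD 0))
        else dst) dst
    else dst

lemma bc_A_eq (src : List (List Int)) (sw sh dw dh xoff yoff : Int) :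
    blit_center src sw sh dw dh xoff yoff =
      (List.range sh.toNat).foldl
        (bcOuterStep src (PySem.Int.floordiv (dw - sw) 2 + xoff) (PySem.Int.floordiv (dh - sh) 2 + yoff) sw dw dh)
        (List.replicate dh.toNat (List.replicate dw.toNat 0)) := by
  unfold blit_center bcOuterStep
  rfl

lemma bc_inner_len (ox dw : Int) (row : List Int) (l : List Nat) (r : List Int) :
    (l.foldl (bcInner ox dw row) r).length = r.length := by
  induction l generalizing r with
  | nil => rfl
  | cons x xs ih =>
    simp only [List.foldl_cons, bcInner]
    split <;> simp [ih]

-- pull the row out: the nested-write loop equals a set of the folded row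
lemma bc_inner_set (ox dw : Int) (row : List Int) (l : List Nat) (dst : List (List Int))
    (t : Nat) (ht : t < dst.length) :
    l.foldl (fun (d : List (List Int)) (x : Nat) =>
        if 0 ≤ ox + (x:Int) ∧ ox + (x:Int) < dw then
          d.set t ((d.getD t []).set (ox + (x:Int)).toNat ((PySem.List.pyGet? row (x:Int)).getD 0))
        else d) dst
      = dst.set t (l.foldl (bcInner ox dw row) (dst.getD t [])) := by
  induction l generalizing dst with
  | nil =>
    simp [List.getD_eq_getElem?_getD, List.getElem?_eq_getElem ht, List.set_getElem_self]
  | cons x xs ih =>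
    simp only [List.foldl_cons, bcInner]
    split
    · rw [ih _ (by simpa using ht)]
      simp [List.set_set, List.getD_eq_getElem?_getD, ht]
    · exact ih dst ht

lemma bc_inner_char (ox dw : Int) (row : List Int) (m : Nat) (r : List Int)
    (j : Nat) (hj : j < r.length) :
    ((List.range m).foldl (bcInner ox dw row) r)[j]? =
      if 0 ≤ (j:Int) - ox ∧ (j:Int) - ox < (m:Int) ∧ (j:Int) < dw then
        some ((PySem.List.pyGet? row ((j:Int) - ox)).getD 0)
      else r[j]? := by
  induction m with
  | zero =>
    simp only [List.range_zero, List.foldl_nil]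
    rw [if_neg (by omega)]
  | succ n ih =>
    rw [List.range_succ, List.foldl_append, List.foldl_cons, List.foldl_nil]
    simp only [bcInner]
    have hfl : ((List.range n).foldl (bcInner ox dw row) r).length = r.length :=
      bc_inner_len ox dw row (List.range n) r
    by_cases hP : 0 ≤ ox + (n:Int) ∧ ox + (n:Int) < dw
    · rw [if_pos hP]
      by_cases hje : j = (ox + (n:Int)).toNat
      · subst hje
        rw [List.getElem?_set_self (by rw [hfl]; omega)]
        have hcnd : 0 ≤ (((ox + (n:Int)).toNat:Int)) - ox ∧
            (((ox + (n:Int)).toNat:Int)) - ox < ((n+1:Nat):Int) ∧ (((ox + (n:Int)).toNat:Int)) < dw := by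
          omega
        rw [if_pos hcnd, show (((ox + (n:Int)).toNat:Int)) - ox = (n:Int) by omega]
      · rw [List.getElem?_set_ne (by omega), ih]
        by_cases hc : 0 ≤ (j:Int) - ox ∧ (j:Int) - ox < (n:Int) ∧ (j:Int) < dw
        · rw [if_pos hc, if_pos (by omega)]
        · rw [if_neg hc, if_neg (by omega)]
    · rw [if_neg hP, ih]
      by_cases hc : 0 ≤ (j:Int) - ox ∧ (j:Int) - ox < (n:Int) ∧ (j:Int) < dw
      · rw [if_pos hc, if_pos (by omega)]
      · rw [if_neg hc, if_neg (by omega)]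

-- full characterisation of A's scatter loop after the first n source rows
lemma bc_outer_char (src : List (List Int)) (ox oy sw dw dh : Int) (n : Nat) :
    (((List.range n).foldl (bcOuterStep src ox oy sw dw dh)
        (List.replicate dh.toNat (List.replicate dw.toNat 0))).length = dh.toNat)
    ∧ ∀ i, i < dh.toNat →
        ((((List.range n).foldl (bcOuterStep src ox oy sw dw dh)
            (List.replicate dh.toNat (List.replicate dw.toNat 0))).getD i []).length = dw.toNat
        ∧ ∀ j, j < dw.toNat →
          (((List.range n).foldl (bcOuterStep src ox oy sw dw dh)
              (List.replicate dh.toNat (List.replicate dw.toNat 0))).getD i []).getD j 0 =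
            if 0 ≤ (i:Int) - oy ∧ (i:Int) - oy < (n:Int) ∧ 0 ≤ (j:Int) - ox ∧ (j:Int) - ox < sw then
              bcVal src ox oy i j
            else 0) := by
  induction n with
  | zero =>
    refine ⟨by simp, fun i hi => ⟨?_, fun j hj => ?_⟩⟩
    · simp [List.getD_eq_getElem?_getD, hi]
    · simp only [List.range_zero, List.foldl_nil]
      have h1 : ((List.replicate dh.toNat (List.replicate dw.toNat (0:Int))).getD i []) = List.replicate dw.toNat 0 := by
        rw [List.getD_eq_getElem?_getD, List.getElem?_replicate, if_pos hi, Option.getD_some]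
      rw [h1, List.getD_eq_getElem?_getD, List.getElem?_replicate, if_pos hj, Option.getD_some,
        if_neg (by omega)]
  | succ n ih =>
    obtain ⟨hlen, hrows⟩ := ih
    rw [List.range_succ, List.foldl_append, List.foldl_cons, List.foldl_nil]
    set res := (List.range n).foldl (bcOuterStep src ox oy sw dw dh)
        (List.replicate dh.toNat (List.replicate dw.toNat 0)) with hres
    by_cases hQ : 0 ≤ oy + (n:Int) ∧ oy + (n:Int) < dh
    · have hstep : bcOuterStep src ox oy sw dw dh res n =
          res.set (oy + (n:Int)).toNat
            ((List.range sw.toNat).foldl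
              (bcInner ox dw ((PySem.List.pyGet? src (n:Int)).getD []))
              (res.getD (oy + (n:Int)).toNat [])) := by
        simp only [bcOuterStep]
        rw [if_pos hQ]
        exact bc_inner_set ox dw _ _ res _ (by rw [hlen]; omega)
      rw [hstep]
      refine ⟨by simp [hlen], fun i hi => ?_⟩
      by_cases hie : i = (oy + (n:Int)).toNat
      · subst hie
        obtain ⟨hrl, hrv⟩ := hrows (oy + (n:Int)).toNat (by omega)
        have hset : (res.set (oy + (n:Int)).toNat
            ((List.range sw.toNat).foldl (bcInner ox dw ((PySem.List.pyGet? src (n:Int)).getD []))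
              (res.getD (oy + (n:Int)).toNat []))).getD (oy + (n:Int)).toNat []
            = (List.range sw.toNat).foldl (bcInner ox dw ((PySem.List.pyGet? src (n:Int)).getD []))
              (res.getD (oy + (n:Int)).toNat []) := by
          rw [List.getD_eq_getElem?_getD, List.getElem?_set_self (by rw [hlen]; omega)]
          rfl
        rw [hset]
        refine ⟨by rw [bc_inner_len]; exact hrl, fun j hj => ?_⟩
        rw [List.getD_eq_getElem?_getD,
            bc_inner_char ox dw _ sw.toNat _ j (by rw [hrl]; exact hj)]
        by_cases hc : 0 ≤ (j:Int) - ox ∧ (j:Int) - ox < sw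
        · have h1 : 0 ≤ (j:Int) - ox ∧ (j:Int) - ox < (sw.toNat:Int) ∧ (j:Int) < dw := by omega
          have h2 : 0 ≤ ((oy + (n:Int)).toNat:Int) - oy ∧ ((oy + (n:Int)).toNat:Int) - oy < ((n+1:Nat):Int) ∧
              0 ≤ (j:Int) - ox ∧ (j:Int) - ox < sw := by omega
          rw [if_pos h1, if_pos h2]
          simp only [Option.getD_some, bcVal]
          rw [show (((oy + (n:Int)).toNat:Int)) - oy = (n:Int) by omega]
        · have h1 : ¬ (0 ≤ (j:Int) - ox ∧ (j:Int) - ox < (sw.toNat:Int) ∧ (j:Int) < dw) := by omega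
          have h2 : ¬ (0 ≤ ((oy + (n:Int)).toNat:Int) - oy ∧ ((oy + (n:Int)).toNat:Int) - oy < ((n+1:Nat):Int) ∧
              0 ≤ (j:Int) - ox ∧ (j:Int) - ox < sw) := by omega
          have h3 : ¬ (0 ≤ ((oy + (n:Int)).toNat:Int) - oy ∧ ((oy + (n:Int)).toNat:Int) - oy < ((n:Nat):Int) ∧
              0 ≤ (j:Int) - ox ∧ (j:Int) - ox < sw) := by omega
          rw [if_neg h1, ← List.getD_eq_getElem?_getD, hrv j hj, if_neg h3, if_neg h2]
      · obtain ⟨hrl, hrv⟩ := hrows i hi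
        have hset : (res.set (oy + (n:Int)).toNat
            ((List.range sw.toNat).foldl (bcInner ox dw ((PySem.List.pyGet? src (n:Int)).getD []))
              (res.getD (oy + (n:Int)).toNat []))).getD i [] = res.getD i [] := by
          rw [List.getD_eq_getElem?_getD, List.getElem?_set_ne (by omega),
              ← List.getD_eq_getElem?_getD]
        rw [hset]
        refine ⟨hrl, fun j hj => ?_⟩
        rw [hrv j hj]
        by_cases hc : 0 ≤ (i:Int) - oy ∧ (i:Int) - oy < (n:Int) ∧ 0 ≤ (j:Int) - ox ∧ (j:Int) - ox < sw
        · rw [if_pos hc, if_pos (by omega)]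
        · rw [if_neg hc, if_neg (by omega)]
    · simp only [bcOuterStep]
      rw [if_neg hQ]
      refine ⟨hlen, fun i hi => ?_⟩
      obtain ⟨hrl, hrv⟩ := hrows i hi
      refine ⟨hrl, fun j hj => ?_⟩
      rw [hrv j hj]
      by_cases hc : 0 ≤ (i:Int) - oy ∧ (i:Int) - oy < (n:Int) ∧ 0 ≤ (j:Int) - ox ∧ (j:Int) - ox < sw
      · rw [if_pos hc, if_pos (by omega)]
      · rw [if_neg hc, if_neg (by omega)]

lemma bc_B_len (src : List (List Int)) (sw sh dw dh xoff yoff : Int) :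
    (blit_center_alt src sw sh dw dh xoff yoff).length = dh.toNat := by
  simp [blit_center_alt]

lemma bc_B_row_len (src : List (List Int)) (sw sh dw dh xoff yoff : Int) (i : Nat)
    (hi : i < (blit_center_alt src sw sh dw dh xoff yoff).length) :
    (blit_center_alt src sw sh dw dh xoff yoff)[i].length = dw.toNat := by
  simp [blit_center_alt]

lemma bc_B_val (src : List (List Int)) (sw sh dw dh xoff yoff : Int) (i j : Nat)
    (hi : i < (blit_center_alt src sw sh dw dh xoff yoff).length)
    (hj : j < (blit_center_alt src sw sh dw dh xoff yoff)[i].length) :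
    (blit_center_alt src sw sh dw dh xoff yoff)[i][j] =
      if 0 ≤ (i:Int) - (PySem.Int.floordiv (dh - sh) 2 + yoff) ∧
         (i:Int) - (PySem.Int.floordiv (dh - sh) 2 + yoff) < sh ∧
         0 ≤ (j:Int) - (PySem.Int.floordiv (dw - sw) 2 + xoff) ∧
         (j:Int) - (PySem.Int.floordiv (dw - sw) 2 + xoff) < sw then
        bcVal src (PySem.Int.floordiv (dw - sw) 2 + xoff) (PySem.Int.floordiv (dh - sh) 2 + yoff) i j
      else 0 := by
  simp only [blit_center_alt, List.getElem_map, List.getElem_range, bcVal]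

-- ===== VERDICT (by name: the statement is the Claim_ definition above) =====
theorem blit_center_spec : Claim_equal_blit_center := by
  intro src sw sh dw dh xoff yoff _ _
  unfold Spec_blit_center
  obtain ⟨hlen, hrows⟩ := bc_outer_char src (PySem.Int.floordiv (dw - sw) 2 + xoff)
    (PySem.Int.floordiv (dh - sh) 2 + yoff) sw dw dh sh.toNat
  rw [bc_A_eq]
  set F := (List.range sh.toNat).foldl
      (bcOuterStep src (PySem.Int.floordiv (dw - sw) 2 + xoff) (PySem.Int.floordiv (dh - sh) 2 + yoff) sw dw dh)
      (List.replicate dh.toNat (List.replicate dw.toNat 0)) with hF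
  apply List.ext_getElem
  · rw [hlen, bc_B_len]
  · intro i hi hi2
    have hi' : i < dh.toNat := by rw [hlen] at hi; exact hi
    obtain ⟨hrl, hrv⟩ := hrows i hi'
    have hFi : F.getD i [] = F[i] := by
      rw [List.getD_eq_getElem?_getD, List.getElem?_eq_getElem hi, Option.getD_some]
    apply List.ext_getElem
    · rw [← hFi, hrl, bc_B_row_len src sw sh dw dh xoff yoff i hi2]
    · intro j hj hj2
      have hj' : j < dw.toNat := by rw [← hFi, hrl] at hj; exact hj
      have hA : F[i][j] =
          if 0 ≤ (i:Int) - (PySem.Int.floordiv (dh - sh) 2 + yoff) ∧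
             (i:Int) - (PySem.Int.floordiv (dh - sh) 2 + yoff) < (sh.toNat:Int) ∧
             0 ≤ (j:Int) - (PySem.Int.floordiv (dw - sw) 2 + xoff) ∧
             (j:Int) - (PySem.Int.floordiv (dw - sw) 2 + xoff) < sw then
            bcVal src (PySem.Int.floordiv (dw - sw) 2 + xoff) (PySem.Int.floordiv (dh - sh) 2 + yoff) i j
          else 0 := by
        have h := hrv j hj'
        rw [hFi] at h
        rw [List.getD_eq_getElem?_getD, List.getElem?_eq_getElem hj, Option.getD_some] at h
        exact h
      rw [hA, bc_B_val src sw sh dw dh xoff yoff i j hi2 hj2]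
      by_cases hc : 0 ≤ (i:Int) - (PySem.Int.floordiv (dh - sh) 2 + yoff) ∧
          (i:Int) - (PySem.Int.floordiv (dh - sh) 2 + yoff) < sh ∧
          0 ≤ (j:Int) - (PySem.Int.floordiv (dw - sw) 2 + xoff) ∧
          (j:Int) - (PySem.Int.floordiv (dw - sw) 2 + xoff) < sw
      · rw [if_pos (by omega), if_pos hc]
      · rw [if_neg (by omega), if_neg hc]
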